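-- pv_equiv track=rewrite | github.com/cwhy/aoc | 2019/15/main.py | pos_calc
-- ===== SOURCE A (Python) =====
-- from typing import List, Tuple
--
-- def pos_calc(steps: List[int]) -> Tuple[int, int]:
--     orig = [0, 0]
--     for d in steps:
--         if d == 1:
--             orig[0] += 1
--         elif d == 2:
--             orig[0] -= 1
--         elif d == 3:
--             orig[1] += 1
--         elif d == 4:
--             orig[1] -= 1
--         else:
--             raise NotImplementedError("")
--     return tuple(orig)
-- ===== SOURCE B (Python) =====
-- from typing import List, Tuple
--
-- def pos_calc(steps: List[int]) -> Tuple[int, int]: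
--     c1 = steps.count(1)
--     c2 = steps.count(2)
--     c3 = steps.count(3)
--     c4 = steps.count(4)
--     if c1 + c2 + c3 + c4 != len(steps):
--         raise NotImplementedError("")
--     return (c1 - c2, c3 - c4)
-- ===== Notes on version B (the rewrite author's own statement) =====
-- stated objective: idiomatic
-- what changed: Replaces the running-accumulator loop with per-element branching by a frequency tabulation (list.count of each direction) combined in a closed form (c1-c2, c3-c4), validating membership by comparing the count total with the length.
import Mathlib
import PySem

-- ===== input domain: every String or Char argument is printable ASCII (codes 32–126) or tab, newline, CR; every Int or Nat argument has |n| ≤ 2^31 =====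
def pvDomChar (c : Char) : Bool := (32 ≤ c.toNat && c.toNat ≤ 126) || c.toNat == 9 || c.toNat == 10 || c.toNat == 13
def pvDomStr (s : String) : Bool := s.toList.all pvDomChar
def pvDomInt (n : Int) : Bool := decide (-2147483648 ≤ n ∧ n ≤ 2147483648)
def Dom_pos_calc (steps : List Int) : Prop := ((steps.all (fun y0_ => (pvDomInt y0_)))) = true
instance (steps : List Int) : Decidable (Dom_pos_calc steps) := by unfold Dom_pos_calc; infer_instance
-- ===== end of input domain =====

-- B replaces A's running-accumulator loop by a frequency tabulation (count of each
-- direction) combined in closed form; objective: idiomatic. Equivalence is on Pre_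
-- (all steps in {1,2,3,4}); outside it both Pythons raise NotImplementedError.

-- ===== PORT A =====
def pos_calc (steps : List Int) : Int × Int :=
  steps.foldl (fun orig d =>
    if d = 1 then (orig.1 + 1, orig.2)
    else if d = 2 then (orig.1 - 1, orig.2)
    else if d = 3 then (orig.1, orig.2 + 1)
    else if d = 4 then (orig.1, orig.2 - 1)
    else orig)  -- else: Python raises NotImplementedError(""); excluded by Pre_
    (0, 0)

-- ===== PORT B =====
def pos_calc_alt (steps : List Int) : Int × Int :=
  let c1 : Int := (PySem.List.count steps 1 : Nat)
  let c2 : Int := (PySem.List.count steps 2 : Nat)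
  let c3 : Int := (PySem.List.count steps 3 : Nat)
  let c4 : Int := (PySem.List.count steps 4 : Nat)
  -- if c1+c2+c3+c4 ≠ len(steps): Python raises NotImplementedError(""); excluded by Pre_
  (c1 - c2, c3 - c4)

-- ===== PRECONDITION & SPEC =====
-- Pre_ excludes exactly the inputs containing a step outside {1,2,3,4}, on which A raises.
def Pre_pos_calc (steps : List Int) : Prop :=
  (steps.all (fun d => d == 1 || d == 2 || d == 3 || d == 4)) = true
instance (steps : List Int) : Decidable (Pre_pos_calc steps) := by unfold Pre_pos_calc; infer_instance
def pvWitness_pos_calc : List Int := [1, 3, 2, 4, 1]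

def Spec_pos_calc (steps : List Int) (out : Int × Int) : Prop := out = pos_calc_alt steps
instance (steps : List Int) (out : Int × Int) : Decidable (Spec_pos_calc steps out) := by unfold Spec_pos_calc; infer_instance

-- ===== CLAIM (what is proved, stated in full; the proofs are below) =====
def Claim_equal_pos_calc : Prop := ∀ (steps : List Int), Dom_pos_calc steps → Pre_pos_calc steps → Spec_pos_calc steps (pos_calc steps)

-- ===== LEMMAS AND PROOFS =====

theorem pos_calc_foldl_counts (steps : List Int) (x y : Int)
    (h : ∀ d ∈ steps, d = 1 ∨ d = 2 ∨ d = 3 ∨ d = 4) :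
    steps.foldl (fun orig d =>
      if d = 1 then (orig.1 + 1, orig.2)
      else if d = 2 then (orig.1 - 1, orig.2)
      else if d = 3 then (orig.1, orig.2 + 1)
      else if d = 4 then (orig.1, orig.2 - 1)
      else orig) (x, y)
    = (x + steps.count 1 - steps.count 2, y + steps.count 3 - steps.count 4) := by
  induction steps generalizing x y with
  | nil => simp
  | cons d t ih =>
    have hd := h d (List.mem_cons_self ..)
    have ht : ∀ e ∈ t, e = 1 ∨ e = 2 ∨ e = 3 ∨ e = 4 := fun e he => h e (List.mem_cons_of_mem _ he)
    rcases hd with h1 | h1 | h1 | h1 <;>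
      simp [h1, ih _ _ ht] <;> omega

-- ===== VERDICT (by name: the statement is the Claim_ definition above) =====
theorem pos_calc_spec : Claim_equal_pos_calc := by
  intro steps _ hpre
  have h : ∀ d ∈ steps, d = 1 ∨ d = 2 ∨ d = 3 ∨ d = 4 := by
    intro d hd
    have := List.all_eq_true.mp hpre d hd
    simp at this; tauto
  unfold Spec_pos_calc pos_calc pos_calc_alt
  rw [pos_calc_foldl_counts steps 0 0 h]
  simp [PySem.List.count_eq]
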